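-- pv_equiv track=rewrite | github.com/sys-intelligence/system-intelligence-benchmark | benchmarks/sregym/sregym_core/clients/stratus/tools/stratus_tool_node.py | reschedule_tool_calls
-- ===== SOURCE A (Python) =====
-- def reschedule_tool_calls(tool_calls):
--     # reschedule the order of tool_calls
--     rescheduled_tool_calls = []
--     submit_tool_call = []
--     wait_tool_call = []
--     for tool_call in tool_calls:
--         if tool_call["name"] == "submit_tool":
--             submit_tool_call.append(tool_call)
--         elif tool_call["name"] == "wait_tool":
--             wait_tool_call.append(tool_call)
--         else:
--             rescheduled_tool_calls.append(tool_call)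
--     # submit_tool call is scheduled the first;
--     # wait_tool call is scheduled the last.
--     rescheduled_tool_calls = submit_tool_call + rescheduled_tool_calls + wait_tool_call
--     return rescheduled_tool_calls
-- ===== SOURCE B (Python) =====
-- def reschedule_tool_calls(tool_calls):
--     priority = {"submit_tool": 0, "wait_tool": 2}
--     return sorted(tool_calls, key=lambda tc: priority.get(tc["name"], 1))
-- ===== Notes on version B (the rewrite author's own statement) =====
-- stated objective: idiomatic
-- what changed: Replaces the three-bucket accumulator loop and concatenation with a single stable sort keyed by a priority map (submit_tool=0, other=1, wait_tool=2), relying on sort stability to keep relative order within each group.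
import Mathlib
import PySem

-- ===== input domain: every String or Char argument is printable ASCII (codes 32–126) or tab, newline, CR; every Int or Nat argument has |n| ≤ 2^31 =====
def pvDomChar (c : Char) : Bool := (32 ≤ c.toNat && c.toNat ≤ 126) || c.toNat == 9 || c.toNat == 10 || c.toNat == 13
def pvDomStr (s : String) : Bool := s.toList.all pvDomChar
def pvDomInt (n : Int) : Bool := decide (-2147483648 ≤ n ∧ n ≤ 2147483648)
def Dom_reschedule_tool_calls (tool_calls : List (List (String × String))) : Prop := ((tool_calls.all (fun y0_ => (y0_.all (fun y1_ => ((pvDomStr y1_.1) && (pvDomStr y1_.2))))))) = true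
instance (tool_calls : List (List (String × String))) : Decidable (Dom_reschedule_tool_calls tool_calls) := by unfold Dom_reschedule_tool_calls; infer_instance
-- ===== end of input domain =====

-- B replaces A's three-bucket accumulator loop with one stable sort keyed by a priority map (idiomatic; not faster).

-- shared primitive: Python assoc-list dict lookup d[k] (first match; none = KeyError, excluded by Pre_)
def pvLookup (d : List (String × String)) (k : String) : Option String :=
  (d.find? (fun p => p.1 == k)).map Prod.snd

-- tool_call["name"]; total via getD "" — exact on Pre_ (where the key is present)
def pvName (tc : List (String × String)) : String := (pvLookup tc "name").getD ""

-- ===== PORT A =====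
-- loop body: state = (rescheduled_tool_calls, submit_tool_call, wait_tool_call)
def pvStepA (st : List (List (String × String)) × List (List (String × String)) × List (List (String × String)))
    (tc : List (String × String)) :
    List (List (String × String)) × List (List (String × String)) × List (List (String × String)) :=
  if pvName tc == "submit_tool" then (st.1, st.2.1 ++ [tc], st.2.2)
  else if pvName tc == "wait_tool" then (st.1, st.2.1, st.2.2 ++ [tc])
  else (st.1 ++ [tc], st.2.1, st.2.2)

def reschedule_tool_calls (tool_calls : List (List (String × String))) : List (List (String × String)) :=
  let st := tool_calls.foldl pvStepA ([], [], [])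
  st.2.1 ++ st.1 ++ st.2.2

-- ===== PORT B =====
def pvPriority : PySem.Dict String Int := PySem.Dict.mk [("submit_tool", 0), ("wait_tool", 2)]

def pvKeyB (tc : List (String × String)) : Int := (PySem.Dict.get? pvPriority (pvName tc)).getD 1

def reschedule_tool_calls_alt (tool_calls : List (List (String × String))) : List (List (String × String)) :=
  PySem.List.sorted tool_calls pvKeyB

-- ===== PRECONDITION & SPEC =====
-- Pre_ excludes tool_calls containing an entry without a "name" key, on which Python A raises KeyError.
def Pre_reschedule_tool_calls (tool_calls : List (List (String × String))) : Prop :=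
  ∀ tc ∈ tool_calls, (pvLookup tc "name").isSome
instance (tool_calls : List (List (String × String))) : Decidable (Pre_reschedule_tool_calls tool_calls) := by unfold Pre_reschedule_tool_calls; infer_instance

def pvWitness_reschedule_tool_calls : (List (List (String × String))) :=
  [[("name", "wait_tool")], [("name", "foo")], [("name", "submit_tool")]]

def Spec_reschedule_tool_calls (tool_calls : List (List (String × String))) (out : List (List (String × String))) : Prop := out = reschedule_tool_calls_alt tool_calls
instance (tool_calls : List (List (String × String))) (out : List (List (String × String))) : Decidable (Spec_reschedule_tool_calls tool_calls out) := by unfold Spec_reschedule_tool_calls; infer_instance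

-- ===== CLAIM (what is proved, stated in full; the proofs are below) =====
def Claim_equal_reschedule_tool_calls : Prop := ∀ (tool_calls : List (List (String × String))), Dom_reschedule_tool_calls tool_calls → Pre_reschedule_tool_calls tool_calls → Spec_reschedule_tool_calls tool_calls (reschedule_tool_calls tool_calls)

-- ===== LEMMAS AND PROOFS =====

-- insertBy places x after every element it is not 'before' and in front of the rest
theorem pv_insertBy_middle {α : Type} (before : α → α → Bool) (x : α) (L R : List α)
    (hL : ∀ y ∈ L, before x y = false) (hR : ∀ y ∈ R, before x y = true) :
    PySem.List.insertBy before x (L ++ R) = L ++ x :: R := by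
  induction L with
  | nil =>
    cases R with
    | nil => simp [PySem.List.insertBy]
    | cons y ys => simp [PySem.List.insertBy, hR y (by simp)]
  | cons y L ih =>
    have hy : before x y = false := hL y (by simp)
    simp [PySem.List.insertBy, hy]
    exact ih (fun z hz => hL z (by simp [hz]))

-- stable sort with a {0,1,2}-valued key = concatenation of the three key groups, in order
theorem pv_sorted3 {α : Type} (key : α → Int) (xs : List α)
    (h : ∀ x ∈ xs, key x = 0 ∨ key x = 1 ∨ key x = 2) :
    PySem.List.sorted xs key =
      xs.filter (fun x => key x == 0) ++ xs.filter (fun x => key x == 1) ++ xs.filter (fun x => key x == 2) := by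
  rw [PySem.List.sorted_eq_foldl_insertBy]
  induction xs using List.reverseRecOn with
  | nil => simp
  | append_singleton s x ih =>
    have hs : ∀ y ∈ s, key y = 0 ∨ key y = 1 ∨ key y = 2 := fun y hy => h y (by simp [hy])
    rw [List.foldl_append, List.foldl_cons, List.foldl_nil, ih hs]
    have hmem0 : ∀ y ∈ s.filter (fun a => key a == (0:Int)), key y = 0 := by
      intro y hy; simpa using (List.of_mem_filter hy)
    have hmem1 : ∀ y ∈ s.filter (fun a => key a == (1:Int)), key y = 1 := by
      intro y hy; simpa using (List.of_mem_filter hy)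
    have hmem2 : ∀ y ∈ s.filter (fun a => key a == (2:Int)), key y = 2 := by
      intro y hy; simpa using (List.of_mem_filter hy)
    rcases h x (by simp) with hx | hx | hx
    · rw [List.append_assoc]
      rw [pv_insertBy_middle _ x (s.filter (fun a => key a == (0:Int)))
          (s.filter (fun a => key a == (1:Int)) ++ s.filter (fun a => key a == (2:Int)))
          (by intro y hy; have := hmem0 y hy; simp [hx, this])
          (by intro y hy; rcases List.mem_append.1 hy with hy | hy
              · have := hmem1 y hy; simp [hx, this]
              · have := hmem2 y hy; simp [hx, this])]
      simp [List.filter_append, hx]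
    · rw [pv_insertBy_middle _ x
          (s.filter (fun a => key a == (0:Int)) ++ s.filter (fun a => key a == (1:Int)))
          (s.filter (fun a => key a == (2:Int)))
          (by intro y hy; rcases List.mem_append.1 hy with hy | hy
              · have := hmem0 y hy; simp [hx, this]
              · have := hmem1 y hy; simp [hx, this])
          (by intro y hy; have := hmem2 y hy; simp [hx, this])]
      simp [List.filter_append, hx]
    · rw [show (s.filter (fun a => key a == (0:Int)) ++ s.filter (fun a => key a == (1:Int)) ++ s.filter (fun a => key a == (2:Int)))
            = (s.filter (fun a => key a == (0:Int)) ++ s.filter (fun a => key a == (1:Int)) ++ s.filter (fun a => key a == (2:Int))) ++ ([] : List α) from (List.append_nil _).symm]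
      rw [pv_insertBy_middle _ x _ []
          (by intro y hy
              rcases List.mem_append.1 hy with hy | hy
              · rcases List.mem_append.1 hy with hy | hy
                · have := hmem0 y hy; simp [hx, this]
                · have := hmem1 y hy; simp [hx, this]
              · have := hmem2 y hy; simp [hx, this])
          (by intro y hy; simp at hy)]
      simp [List.filter_append, hx]

-- A's loop leaves exactly the three filtered groups in its accumulators
theorem pv_loopA (s : List (List (String × String)))
    (r sub w : List (List (String × String))) :
    s.foldl pvStepA (r, sub, w)
    = (r ++ s.filter (fun tc => !(pvName tc == "submit_tool") && !(pvName tc == "wait_tool")),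
       sub ++ s.filter (fun tc => pvName tc == "submit_tool"),
       w ++ s.filter (fun tc => pvName tc == "wait_tool")) := by
  induction s generalizing r sub w with
  | nil => simp
  | cons tc s ih =>
    rw [List.foldl_cons]
    by_cases h0 : pvName tc = "submit_tool"
    · rw [show pvStepA (r, sub, w) tc = (r, sub ++ [tc], w) from by simp [pvStepA, h0], ih]
      simp [List.filter_cons, h0]
    · by_cases h2 : pvName tc = "wait_tool"
      · rw [show pvStepA (r, sub, w) tc = (r, sub, w ++ [tc]) from by simp [pvStepA, h0, h2], ih]
        simp [List.filter_cons, h0, h2]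
      · rw [show pvStepA (r, sub, w) tc = (r ++ [tc], sub, w) from by simp [pvStepA, h0, h2], ih]
        simp [List.filter_cons, h0, h2]

-- B's key, in branch form
theorem pv_keyB_eq (tc : List (String × String)) :
    pvKeyB tc = if pvName tc == "submit_tool" then 0 else if pvName tc == "wait_tool" then 2 else 1 := by
  unfold pvKeyB pvPriority
  by_cases h0 : pvName tc = "submit_tool"
  · simp [PySem.Dict.get?_mk_cons, h0]
  · by_cases h2 : pvName tc = "wait_tool"
    · simp [PySem.Dict.get?_mk_cons, h0, h2, Ne.symm h0]
    · simp [PySem.Dict.get?, h0, h2, Ne.symm h0, Ne.symm h2]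

-- ===== VERDICT (by name: the statement is the Claim_ definition above) =====
theorem reschedule_tool_calls_spec : Claim_equal_reschedule_tool_calls := by
  intro tool_calls _ _
  unfold Spec_reschedule_tool_calls reschedule_tool_calls reschedule_tool_calls_alt
  rw [pv_sorted3 pvKeyB tool_calls (by
    intro x _; rw [pv_keyB_eq x]; split_ifs <;> simp)]
  rw [pv_loopA tool_calls [] [] []]
  simp only [List.nil_append]
  have e0 : tool_calls.filter (fun tc => pvName tc == "submit_tool")
      = tool_calls.filter (fun x => pvKeyB x == 0) :=
    List.filter_congr (by intro x _; rw [pv_keyB_eq x]; split_ifs <;> simp_all)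
  have e1 : tool_calls.filter (fun tc => !(pvName tc == "submit_tool") && !(pvName tc == "wait_tool"))
      = tool_calls.filter (fun x => pvKeyB x == 1) :=
    List.filter_congr (by intro x _; rw [pv_keyB_eq x]; split_ifs <;> simp_all)
  have e2 : tool_calls.filter (fun tc => pvName tc == "wait_tool")
      = tool_calls.filter (fun x => pvKeyB x == 2) :=
    List.filter_congr (by intro x _; rw [pv_keyB_eq x]; split_ifs <;> simp_all)
  rw [e0, e1, e2]
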